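-- pv_equiv track=rewrite | github.com/kdm0927/codingtest | LeeTaeJeong/week6/체육복.py | solution
-- ===== SOURCE A (Python) =====
-- def solution(n, lost, reserve):
--
--     lost_set = set(lost)
--     reserve_set = set(reserve)
--
--     # lost_set과 reserve_set의 교집합
--     common = lost_set.intersection(reserve_set)
--
--     # 최종적으로 빌려줘야 하는 lost 목록과 빌려줄 수 있는 reserve 목록만 남김
--     final_lost = lost_set - common
--     final_reserve = reserve_set - common
--
--     # 빌려줄 수 있는 reserve 학생들을 순회
--     reserve_list = sorted(list(final_reserve))
--
--     # 빌려주지 못한 lost 학생들을 담을 set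
--     for r in reserve_list:
--         if r - 1 in final_lost:
--             final_lost.remove(r - 1)
--         elif r + 1 in final_lost:
--             final_lost.remove(r + 1)
--
--     # 최종적으로 체육 수업을 들을 수 있는 학생 수 = 전체 학생 수 - 빌려주지 못한 학생 수
--     max_students = n - len(final_lost)
--
--     return max_students
-- ===== SOURCE B (Python) =====
-- def solution(n, lost, reserve):
--     # Sort-then-merge two-pointer sweep instead of per-reserve set removals.
--     L = sorted(set(lost) - set(reserve))
--     R = sorted(set(reserve) - set(lost))
--     i = j = matched = 0
--     while i < len(L) and j < len(R):
--         if R[j] < L[i] - 1: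
--             j += 1
--         elif R[j] > L[i] + 1:
--             i += 1
--         else:
--             matched += 1
--             i += 1
--             j += 1
--     return n - (len(L) - matched)
-- ===== Notes on version B (the rewrite author's own statement) =====
-- stated objective: alternative
-- what changed: Replaces A's per-reserve loop that repeatedly tests and removes members of a lost-set with a sort-then-merge two-pointer sweep over the two sorted disjoint lists, counting matches in one pass.
import Mathlib
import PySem

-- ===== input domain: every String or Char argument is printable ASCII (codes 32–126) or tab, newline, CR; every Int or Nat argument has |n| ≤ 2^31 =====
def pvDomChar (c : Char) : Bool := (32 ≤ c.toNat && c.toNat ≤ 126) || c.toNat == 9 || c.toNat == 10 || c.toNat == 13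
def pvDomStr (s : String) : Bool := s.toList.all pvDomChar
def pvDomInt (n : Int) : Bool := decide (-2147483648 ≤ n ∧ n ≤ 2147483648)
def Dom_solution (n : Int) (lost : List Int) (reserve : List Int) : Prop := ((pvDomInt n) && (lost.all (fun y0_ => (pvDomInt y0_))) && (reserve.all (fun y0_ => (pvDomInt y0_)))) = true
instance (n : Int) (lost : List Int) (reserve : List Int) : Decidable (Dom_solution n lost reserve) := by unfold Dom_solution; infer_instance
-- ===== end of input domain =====

-- B replaces A's per-reserve membership-test-and-remove loop on a set with a
-- sort-then-merge two-pointer sweep over the two sorted disjoint lists (alternative algorithm, same result).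

-- ===== PORT A =====
-- loop body: if r-1 in final_lost: remove; elif r+1 in final_lost: remove
-- (Python's set.remove is guarded by the membership test, so Set.discard is exact here)
def solStep (fl : PySem.Set Int) (r : Int) : PySem.Set Int :=
  if PySem.Set.contains fl (r - 1) then PySem.Set.discard fl (r - 1)
  else if PySem.Set.contains fl (r + 1) then PySem.Set.discard fl (r + 1)
  else fl

def solution (n : Int) (lost : List Int) (reserve : List Int) : Int :=
  let lostSet := PySem.Set.ofList lost
  let reserveSet := PySem.Set.ofList reserve
  let common := PySem.Set.inter lostSet reserveSet
  let finalLost := PySem.Set.diff lostSet common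
  let finalReserve := PySem.Set.diff reserveSet common
  let reserveList := PySem.List.sorted finalReserve (fun x => x)
  let finalLost' := reserveList.foldl solStep finalLost
  n - (finalLost'.length : Int)

-- ===== PORT B =====
-- the two-pointer merge of Source B, as structural recursion on the two sorted lists
def tpCount : List Int → List Int → Nat
  | [], _ => 0
  | _ :: _, [] => 0
  | l :: L, r :: R =>
    if r < l - 1 then tpCount (l :: L) R
    else if r > l + 1 then tpCount L (r :: R)
    else tpCount L R + 1
termination_by L R => L.length + R.length

def solution_alt (n : Int) (lost : List Int) (reserve : List Int) : Int :=
  let L := PySem.List.sorted (PySem.Set.diff (PySem.Set.ofList lost) (PySem.Set.ofList reserve)) (fun x => x)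
  let R := PySem.List.sorted (PySem.Set.diff (PySem.Set.ofList reserve) (PySem.Set.ofList lost)) (fun x => x)
  n - ((L.length : Int) - (tpCount L R : Int))

-- ===== PRECONDITION & SPEC =====
def Spec_solution (n : Int) (lost : List Int) (reserve : List Int) (out : Int) : Prop := out = solution_alt n lost reserve
instance (n : Int) (lost : List Int) (reserve : List Int) (out : Int) : Decidable (Spec_solution n lost reserve out) := by unfold Spec_solution; infer_instance

-- ===== CLAIM (what is proved, stated in full; the proofs are below) =====
def Claim_equal_solution : Prop := ∀ (n : Int) (lost : List Int) (reserve : List Int), Dom_solution n lost reserve → Spec_solution n lost reserve (solution n lost reserve)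

-- ===== LEMMAS AND PROOFS =====

theorem solStep_nil (r : Int) : solStep [] r = [] := by
  simp [solStep, PySem.Set.contains]

theorem fold_nil (R : List Int) : R.foldl solStep [] = [] := by
  induction R with
  | nil => rfl
  | cons r R ih => simp [List.foldl, solStep_nil, ih]

theorem discard_eq_erase (S : List Int) (h : S.Nodup) (a : Int) :
    PySem.Set.discard S a = S.erase a := by
  rw [List.Nodup.erase_eq_filter h a]; rfl

theorem mem_discard (S : List Int) (a x : Int) :
    x ∈ PySem.Set.discard S a ↔ x ∈ S ∧ x ≠ a := by
  simp [PySem.Set.discard]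

theorem nodup_discard (S : List Int) (h : S.Nodup) (a : Int) :
    (PySem.Set.discard S a).Nodup :=
  h.filter _

theorem length_discard (S : List Int) (h : S.Nodup) (a : Int) (ha : a ∈ S) :
    (PySem.Set.discard S a).length + 1 = S.length := by
  rw [discard_eq_erase S h a, List.length_erase_of_mem ha]
  have := List.length_pos_of_mem ha
  omega

theorem discard_comm (S : List Int) (a b : Int) :
    PySem.Set.discard (PySem.Set.discard S a) b = PySem.Set.discard (PySem.Set.discard S b) a := by
  simp [PySem.Set.discard, List.filter_filter, Bool.and_comm]

theorem contains_discard_of_ne (S : List Int) (a x : Int) (h : x ≠ a) :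
    PySem.Set.contains (PySem.Set.discard S a) x = PySem.Set.contains S x := by
  simp only [PySem.Set.contains, List.contains_eq_mem, decide_eq_decide]
  rw [mem_discard S a x]
  exact ⟨fun h' => h'.1, fun h' => ⟨h', h⟩⟩

-- a lost student more than 1 below every remaining reserve is never removed by the loop
theorem fold_skip (R : List Int) : ∀ (S : List Int) (l : Int), l ∈ S → S.Nodup →
    (∀ r ∈ R, l + 1 < r) →
    (R.foldl solStep S).length = (R.foldl solStep (PySem.Set.discard S l)).length + 1 := by
  induction R with
  | nil =>
    intro S l hmem hnd _
    simpa using (length_discard S hnd l hmem).symm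
  | cons r R ih =>
    intro S l hmem hnd hlt
    have hr : l + 1 < r := hlt r (by simp)
    have h1 : r - 1 ≠ l := by omega
    have h2 : r + 1 ≠ l := by omega
    have hc1 := contains_discard_of_ne S l (r - 1) h1
    have hc2 := contains_discard_of_ne S l (r + 1) h2
    simp only [List.foldl]
    have hlt' : ∀ r' ∈ R, l + 1 < r' := fun r' hr' => hlt r' (by simp [hr'])
    by_cases hm1 : PySem.Set.contains S (r - 1) = true
    · have e1 : solStep S r = PySem.Set.discard S (r - 1) := by
        unfold solStep; rw [hm1]; simp
      have e2 : solStep (PySem.Set.discard S l) r = PySem.Set.discard (PySem.Set.discard S l) (r - 1) := by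
        unfold solStep; rw [hc1, hm1]; simp
      rw [e1, e2, discard_comm]
      exact ih (PySem.Set.discard S (r - 1)) l
        ((mem_discard S (r - 1) l).mpr ⟨hmem, fun h => h1 h.symm⟩)
        (nodup_discard S hnd (r - 1)) hlt'
    · simp only [Bool.not_eq_true] at hm1
      by_cases hm2 : PySem.Set.contains S (r + 1) = true
      · have e1 : solStep S r = PySem.Set.discard S (r + 1) := by
          unfold solStep; rw [hm1, hm2]; simp
        have e2 : solStep (PySem.Set.discard S l) r = PySem.Set.discard (PySem.Set.discard S l) (r + 1) := by
          unfold solStep; rw [hc1, hm1, hc2, hm2]; simp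
        rw [e1, e2, discard_comm]
        exact ih (PySem.Set.discard S (r + 1)) l
          ((mem_discard S (r + 1) l).mpr ⟨hmem, fun h => h2 h.symm⟩)
          (nodup_discard S hnd (r + 1)) hlt'
      · simp only [Bool.not_eq_true] at hm2
        have e1 : solStep S r = S := by
          unfold solStep; rw [hm1, hm2]; simp
        have e2 : solStep (PySem.Set.discard S l) r = PySem.Set.discard S l := by
          unfold solStep; rw [hc1, hm1, hc2, hm2]; simp
        rw [e1, e2]
        exact ih S l hmem hnd hlt'

theorem head_min {l : Int} {L : List Int} (h : (l :: L).Pairwise (· < ·)) :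
    ∀ x ∈ l :: L, l ≤ x := by
  intro x hx
  rcases List.mem_cons.mp hx with h' | h'
  · omega
  · exact le_of_lt ((List.pairwise_cons.mp h).1 x h')

-- the main invariant: A's fold over the sorted reserves removes exactly the
-- lost students that B's two-pointer merge matches
theorem fold_tp (L R S : List Int) (hL : L.Pairwise (· < ·)) (hR : R.Pairwise (· < ·))
    (hS : S.Nodup) (hmem : ∀ x, x ∈ S ↔ x ∈ L) (hdisj : ∀ x ∈ L, x ∉ R) :
    (R.foldl solStep S).length + tpCount L R = L.length := by
  match L, R with
  | [], R =>
    have hSnil : S = [] := by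
      apply List.eq_nil_iff_forall_not_mem.mpr
      intro x hx; exact absurd ((hmem x).mp hx) (by simp)
    subst hSnil
    simp [fold_nil, tpCount]
  | l :: L', [] =>
    have hperm : S.Perm (l :: L') := (List.perm_ext_iff_of_nodup hS hL.nodup).mpr hmem
    simp [tpCount, hperm.length_eq]
  | l :: L', r :: R' =>
    have hmin := head_min hL
    by_cases h1 : r < l - 1
    · -- reserve r is too small to help anyone: A's step is a no-op, B advances j
      have c1 : PySem.Set.contains S (r - 1) = false := by
        simp only [PySem.Set.contains, List.contains_eq_mem, decide_eq_false_iff_not]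
        intro hx; have := hmin _ ((hmem _).mp hx); omega
      have c2 : PySem.Set.contains S (r + 1) = false := by
        simp only [PySem.Set.contains, List.contains_eq_mem, decide_eq_false_iff_not]
        intro hx; have := hmin _ ((hmem _).mp hx); omega
      have hstep : solStep S r = S := by unfold solStep; rw [c1, c2]; simp
      have ih := fold_tp (l :: L') R' S hL (List.pairwise_cons.mp hR).2 hS hmem
        (fun x hx hx' => hdisj x hx (by simp [hx']))
      simp only [List.foldl, hstep]
      rw [tpCount]
      simp only [if_pos h1]
      exact ih
    · by_cases h2 : r > l + 1
      · -- every remaining reserve exceeds l+1: l stays unmatched on both sides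
        have hlmem : l ∈ S := (hmem l).mpr (by simp)
        have hlt : ∀ r' ∈ r :: R', l + 1 < r' := by
          intro r' hr'
          rcases List.mem_cons.mp hr' with h' | h'
          · omega
          · have := (List.pairwise_cons.mp hR).1 r' h'; omega
        have hskip := fold_skip (r :: R') S l hlmem hS hlt
        have hlnot : l ∉ L' := (List.nodup_cons.mp hL.nodup).1
        have ih := fold_tp L' (r :: R') (PySem.Set.discard S l) (List.pairwise_cons.mp hL).2 hR
          (nodup_discard S hS l)
          (by
            intro x
            rw [mem_discard S l x, hmem x]
            constructor
            · rintro ⟨hx, hxl⟩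
              rcases List.mem_cons.mp hx with h' | h'
              · exact absurd h' hxl
              · exact h'
            · intro hx; exact ⟨by simp [hx], fun h => hlnot (h ▸ hx)⟩)
          (fun x hx => hdisj x (by simp [hx]))
        rw [tpCount]
        simp only [if_neg h1, if_pos h2]
        simp only [List.length_cons]
        omega
      · -- r = l-1 or r = l+1 (r ≠ l by disjointness): A removes l, B matches the pair
        have hlr : l ≠ r := fun h => hdisj l (by simp) (by simp [h])
        have hlmem : l ∈ S := (hmem l).mpr (by simp)
        have hstep : solStep S r = PySem.Set.discard S l := by
          have hr1 : r = l - 1 ∨ r = l + 1 := by omega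
          rcases hr1 with h | h
          · subst h
            have c1 : PySem.Set.contains S (l - 1 - 1) = false := by
              simp only [PySem.Set.contains, List.contains_eq_mem, decide_eq_false_iff_not]
              intro hx; have := hmin _ ((hmem _).mp hx); omega
            have c2 : PySem.Set.contains S (l - 1 + 1) = true := by
              simp only [PySem.Set.contains, List.contains_eq_mem, decide_eq_true_eq]
              rw [show l - 1 + 1 = l by omega]; exact hlmem
            unfold solStep; rw [c1, c2]; simp [show l - 1 + 1 = l by omega]
          · subst h
            have c1 : PySem.Set.contains S (l + 1 - 1) = true := by
              simp only [PySem.Set.contains, List.contains_eq_mem, decide_eq_true_eq]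
              rw [show l + 1 - 1 = l by omega]; exact hlmem
            unfold solStep; rw [c1]; simp [show l + 1 - 1 = l by omega]
        have hlnot : l ∉ L' := (List.nodup_cons.mp hL.nodup).1
        have ih := fold_tp L' R' (PySem.Set.discard S l) (List.pairwise_cons.mp hL).2
          (List.pairwise_cons.mp hR).2 (nodup_discard S hS l)
          (by
            intro x
            rw [mem_discard S l x, hmem x]
            constructor
            · rintro ⟨hx, hxl⟩
              rcases List.mem_cons.mp hx with h' | h'
              · exact absurd h' hxl
              · exact h'
            · intro hx; exact ⟨by simp [hx], fun h => hlnot (h ▸ hx)⟩)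
          (fun x hx hx' => hdisj x (by simp [hx]) (by simp [hx']))
        have hlen := length_discard S hS l hlmem
        simp only [List.foldl, hstep]
        rw [tpCount]
        simp only [if_neg h1, if_neg h2]
        simp only [List.length_cons]
        omega
termination_by L.length + R.length
decreasing_by all_goals simp [List.length_cons] <;> omega

-- A's "minus the intersection" equals the plain set difference, on both sides
theorem diff_inter_left (s t : PySem.Set Int) :
    PySem.Set.diff s (PySem.Set.inter s t) = PySem.Set.diff s t := by
  unfold PySem.Set.diff
  apply List.filter_congr
  intro x hx
  have : PySem.Set.contains (PySem.Set.inter s t) x = PySem.Set.contains t x := by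
    simp only [PySem.Set.contains, PySem.Set.inter, List.contains_eq_mem, List.mem_filter,
      decide_eq_decide, List.contains_eq_mem, decide_eq_true_eq]
    exact ⟨fun h => h.2, fun h => ⟨hx, h⟩⟩
  rw [this]

theorem diff_inter_right (s t : PySem.Set Int) :
    PySem.Set.diff t (PySem.Set.inter s t) = PySem.Set.diff t s := by
  unfold PySem.Set.diff
  apply List.filter_congr
  intro x hx
  have : PySem.Set.contains (PySem.Set.inter s t) x = PySem.Set.contains s x := by
    simp only [PySem.Set.contains, PySem.Set.inter, List.contains_eq_mem, List.mem_filter,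
      decide_eq_decide, List.contains_eq_mem, decide_eq_true_eq]
    exact ⟨fun h => h.1, fun h => ⟨h, hx⟩⟩
  rw [this]

theorem pairwise_lt_of_sorted_nodup (xs : List Int) (hnd : (PySem.List.sorted xs (fun x => x)).Nodup) :
    (PySem.List.sorted xs (fun x => x)).Pairwise (· < ·) :=
  ((PySem.List.sorted_pairwise xs (fun x => x)).and hnd).imp
    (fun h => lt_of_le_of_ne h.1 h.2)

-- ===== VERDICT (by name: the statement is the Claim_ definition above) =====
theorem solution_spec : Claim_equal_solution := by
  unfold Claim_equal_solution
  intro n lost reserve _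
  unfold Spec_solution solution solution_alt
  simp only [diff_inter_left, diff_inter_right]
  set LS := PySem.Set.ofList lost with hLS
  set RS := PySem.Set.ofList reserve with hRS
  set Sd := PySem.Set.diff LS RS with hSd
  set Rd := PySem.Set.diff RS LS with hRd
  set L := PySem.List.sorted Sd (fun x => x) with hLdef
  set R := PySem.List.sorted Rd (fun x => x) with hRdef
  have hSdnd : Sd.Nodup := (PySem.Set.nodup_ofList lost).filter _
  have hRdnd : Rd.Nodup := (PySem.Set.nodup_ofList reserve).filter _
  have hLperm : L.Perm Sd := PySem.List.sorted_perm Sd (fun x => x) false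
  have hRperm : R.Perm Rd := PySem.List.sorted_perm Rd (fun x => x) false
  have hLnd : L.Nodup := hLperm.nodup_iff.mpr hSdnd
  have hRnd : R.Nodup := hRperm.nodup_iff.mpr hRdnd
  have hLpair : L.Pairwise (· < ·) := pairwise_lt_of_sorted_nodup Sd hLnd
  have hRpair : R.Pairwise (· < ·) := pairwise_lt_of_sorted_nodup Rd hRnd
  have hmem : ∀ x, x ∈ Sd ↔ x ∈ L := fun x => (hLperm.mem_iff).symm
  have hdisj : ∀ x ∈ L, x ∉ R := by
    intro x hxL hxR
    have hx1 : x ∈ Sd := hLperm.mem_iff.mp hxL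
    have hx2 : x ∈ Rd := hRperm.mem_iff.mp hxR
    rw [hSd] at hx1
    rw [hRd] at hx2
    unfold PySem.Set.diff at hx1 hx2
    have h1 := List.mem_filter.mp hx1
    have h2 := List.mem_filter.mp hx2
    simp only [PySem.Set.contains, List.contains_eq_mem, Bool.not_eq_eq_eq_not, Bool.not_true,
      decide_eq_false_iff_not] at h1
    exact h1.2 h2.1
  have hmain := fold_tp L R Sd hLpair hRpair hSdnd hmem hdisj
  have htp : tpCount L R ≤ L.length := by omega
  omega
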